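-- pv_equiv track=rewrite | github.com/ArjanAdhi/Evomatcher | Gen1/train_rhetoric.py | generate_initial_prompt
-- ===== SOURCE A (Python) =====
-- homeostatic_state = {
--     "conscious": {"context": "immediate emergent concepts", "weight": 0.6},
--     "subconscious": {"context": "accumulated long-term knowledge", "weight": 0.4},
-- }
--
-- def get_combined_context() -> str:
--     c = homeostatic_state["conscious"]
--     s = homeostatic_state["subconscious"]
--     return (f"Conscious: {c['context']}\nSubconscious: {s['context']}\n"
--             f"Weights: conscious={c['weight']:.2f}, subconscious={s['weight']:.2f}")
--
-- def format_hierarchy(root: str, hierarchy: dict, level=0) -> str: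
--     indent = "  " * level
--     result = f"{indent}- {root}\n"
--     for child in hierarchy.get(root, []):
--         result += format_hierarchy(child, hierarchy, level+1)
--     return result
--
-- def generate_initial_prompt(root: str, hierarchy: dict, summaries: dict) -> str:
--     hierarchy_str = format_hierarchy(root, hierarchy)
--     snippet_dict = {topic: (summary.split('. ')[0].strip() if summary else "") for topic, summary in summaries.items()}
--     def traverse(node, path):
--         cur_path = path + [node]
--         if node not in hierarchy or not hierarchy[node]:
--             return [cur_path]
--         paths = []
--         for child in hierarchy[node]:
--             paths.extend(traverse(child, cur_path))
--         return paths
--     all_paths = traverse(root, [])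
--     longest_path = max(all_paths, key=lambda p: len(p))
--     if len(longest_path) < 3:
--         siblings = hierarchy.get(root, [])
--         if siblings and len(siblings) >= 2:
--             longest_path = [root, siblings[0], siblings[1]]
--     trace_str = " -> ".join([f"'{topic}' (snippet: \"{snippet_dict.get(topic, '')}\")" for topic in longest_path])
--     comb_context = get_combined_context()
--     prompt = (
--         f"{comb_context}\n\n"
--         f"=== Concept Hierarchy ===\n{hierarchy_str}\n\n"
--         f"Trace-back chain: {trace_str}\n\n"
--         "Based on the above hierarchy, explain in clear, full sentences and in a conversational tone "
--         "how these ideas might be causally connected. Emphasize unexpected insights, novel interconnections, "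
--         "and let the nodes catalyze each other like nodes of Ranvier. Your narrative should be creative, thoughtful, "
--         "and expressed in complete sentences.\n\n"
--         "=== Start Narrative ===\nNarrative:"
--     )
--     return prompt
-- ===== SOURCE B (Python) =====
-- # B: one fused DFS computes the formatted hierarchy AND the longest root-to-leaf path in a
-- # single traversal, and snippets are computed on demand for the chosen path only, instead of
-- # enumerating every root-to-leaf path (O(paths * depth)) and pre-building a snippet for every summary.
-- def generate_initial_prompt(root: str, hierarchy: dict, summaries: dict) -> str:
--     def snippet(topic):
--         s = summaries.get(topic, "")
--         return s.split('. ')[0].strip() if s else ""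
--
--     def dfs(node, level):
--         text = "  " * level + f"- {node}\n"
--         best = [node]
--         for child in hierarchy.get(node, []):
--             child_text, child_path = dfs(child, level + 1)
--             text += child_text
--             if len(child_path) + 1 > len(best):
--                 best = [node] + child_path
--         return text, best
--
--     hierarchy_str, longest_path = dfs(root, 0)
--     if len(longest_path) < 3:
--         siblings = hierarchy.get(root, [])
--         if len(siblings) >= 2:
--             longest_path = [root, siblings[0], siblings[1]]
--     trace_str = " -> ".join(f"'{topic}' (snippet: \"{snippet(topic)}\")" for topic in longest_path)
--     comb_context = ("Conscious: immediate emergent concepts\nSubconscious: accumulated long-term knowledge\n"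
--                     "Weights: conscious=0.60, subconscious=0.40")
--     return (
--         f"{comb_context}\n\n"
--         f"=== Concept Hierarchy ===\n{hierarchy_str}\n\n"
--         f"Trace-back chain: {trace_str}\n\n"
--         "Based on the above hierarchy, explain in clear, full sentences and in a conversational tone "
--         "how these ideas might be causally connected. Emphasize unexpected insights, novel interconnections, "
--         "and let the nodes catalyze each other like nodes of Ranvier. Your narrative should be creative, thoughtful, "
--         "and expressed in complete sentences.\n\n"
--         "=== Start Narrative ===\nNarrative:"
--     )
-- ===== Notes on version B (the rewrite author's own statement) =====
-- stated objective: alternative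
-- what changed: B fuses hierarchy formatting and longest-path search into a single DFS that keeps only the current best (first-maximal) path and computes snippets on demand for the topics on the chosen chain, instead of materialising every root-to-leaf path, taking max over them, and pre-building a snippet dict for all summaries.
import Mathlib
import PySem

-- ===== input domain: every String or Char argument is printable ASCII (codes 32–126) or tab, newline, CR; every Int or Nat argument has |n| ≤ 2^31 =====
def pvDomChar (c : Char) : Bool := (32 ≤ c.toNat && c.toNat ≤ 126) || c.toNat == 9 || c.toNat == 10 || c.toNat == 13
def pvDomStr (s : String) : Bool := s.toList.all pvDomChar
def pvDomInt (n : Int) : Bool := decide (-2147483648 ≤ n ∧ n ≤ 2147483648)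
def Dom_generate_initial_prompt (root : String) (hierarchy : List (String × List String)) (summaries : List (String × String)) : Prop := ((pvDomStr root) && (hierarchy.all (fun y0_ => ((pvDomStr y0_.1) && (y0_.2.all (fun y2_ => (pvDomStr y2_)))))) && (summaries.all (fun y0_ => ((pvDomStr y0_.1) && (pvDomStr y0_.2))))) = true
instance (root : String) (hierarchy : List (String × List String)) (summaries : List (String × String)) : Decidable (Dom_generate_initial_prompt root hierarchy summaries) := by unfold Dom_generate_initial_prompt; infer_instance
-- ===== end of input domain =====

-- B fuses hierarchy formatting and longest-path search into one DFS keeping only the current best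
-- path, and computes snippets only for topics on the chosen chain (alternative decomposition;
-- same return value on every input).

-- Shared argument decoding and constant pieces (identical literal text in both Pythons):
-- get_combined_context() reads only the module constant homeostatic_state; its value is this
-- fixed string (the float format f"{0.6:.2f}" = "0.60" is baked in by hand; exact).
def pvCombinedContext : String :=
  "Conscious: immediate emergent concepts\nSubconscious: accumulated long-term knowledge\nWeights: conscious=0.60, subconscious=0.40"

def pvTailText : String :=
  "Based on the above hierarchy, explain in clear, full sentences and in a conversational tone how these ideas might be causally connected. Emphasize unexpected insights, novel interconnections, and let the nodes catalyze each other like nodes of Ranvier. Your narrative should be creative, thoughtful, and expressed in complete sentences.\n\n=== Start Narrative ===\nNarrative:"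

-- "  " * level
def pvIndent : Nat → String
  | 0 => ""
  | n + 1 => pvIndent n ++ "  "

-- summary.split('. ')[0].strip() if summary else ""   (same expression in both Pythons;
-- '. ' is nonempty so split? never returns none, and the split result is never empty so index 0 is safe)
def pvSnippetOf (v : String) : String :=
  if v = "" then ""
  else PySem.Str.strip (PySem.List.pyGetD ((PySem.Str.split? v ". ").getD []) 0 "")

-- ===== PORT A =====
-- format_hierarchy: result = line; for child in hierarchy.get(root, []): result += rec(child, level+1).
-- The fuel argument (recursion-depth guard) makes the unbounded Python recursion total; on every
-- acyclic hierarchy the depth is at most hierarchy.length + 1, so the guard never fires there.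
-- On a cyclic hierarchy Python recurses until RecursionError; both ports instead treat the node
-- where fuel runs out as a leaf — identically, so the equivalence below is total.
def pvFmt (h : PySem.Dict String (List String)) : Nat → String → Nat → String
  | 0, node, level => pvIndent level ++ "- " ++ node ++ "\n"
  | fuel + 1, node, level =>
      (h.getD node []).foldl (fun acc c => acc ++ pvFmt h fuel c (level + 1))
        (pvIndent level ++ "- " ++ node ++ "\n")

-- traverse: cur_path = path + [node]; leaf test 'node not in hierarchy or not hierarchy[node]';
-- else concatenate the children's path lists (same fuel guard as format_hierarchy).
def pvTrav (h : PySem.Dict String (List String)) : Nat → String → List String → List (List String)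
  | fuel, node, path =>
    let cur := path ++ [node]
    match h.get? node with
    | none => [cur]
    | some cs =>
      if cs = [] then [cur]
      else
        match fuel with
        | 0 => [cur]
        | fuel' + 1 => cs.foldl (fun acc c => acc ++ pvTrav h fuel' c cur) []

def generate_initial_prompt (root : String) (hierarchy : List (String × List String)) (summaries : List (String × String)) : String :=
  let h := PySem.Dict.ofList hierarchy
  let sm := PySem.Dict.ofList summaries
  let hierarchy_str := pvFmt h (hierarchy.length + 1) root 0
  -- {topic: (summary.split('. ')[0].strip() if summary else "") for topic, summary in summaries.items()}
  let snippet_dict := sm.items.foldl (fun d p => d.insert p.1 (pvSnippetOf p.2)) PySem.Dict.empty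
  let all_paths := pvTrav h (hierarchy.length + 1) root []
  -- max(all_paths, key=lambda p: len(p)); all_paths is never empty (traverse returns ≥ 1 path)
  let longest_path :=
    match PySem.List.max? all_paths (fun p => PySem.List.len p) with
    | some p => p
    | none => []
  let longest_path :=
    if longest_path.length < 3 then
      let siblings := h.getD root []
      if siblings ≠ [] ∧ 2 ≤ siblings.length then
        [root, PySem.List.pyGetD siblings 0 "", PySem.List.pyGetD siblings 1 ""]
      else longest_path
    else longest_path
  let trace_str := PySem.Str.join " -> "
    (longest_path.map (fun topic => "'" ++ topic ++ "' (snippet: \"" ++ snippet_dict.getD topic "" ++ "\")"))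
  pvCombinedContext ++ "\n\n" ++ "=== Concept Hierarchy ===\n" ++ hierarchy_str ++ "\n\n" ++
    "Trace-back chain: " ++ trace_str ++ "\n\n" ++ pvTailText

-- ===== PORT B =====
-- One DFS returning (formatted text, longest root-to-leaf path from node); a strictly longer child
-- path replaces the current best, so ties keep the first child (same fuel guard as port A).
def pvDfs (h : PySem.Dict String (List String)) : Nat → String → Nat → String × List String
  | 0, node, level => (pvIndent level ++ "- " ++ node ++ "\n", [node])
  | fuel + 1, node, level =>
      (h.getD node []).foldl
        (fun acc c =>
          let r := pvDfs h fuel c (level + 1)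
          (acc.1 ++ r.1, if r.2.length + 1 > acc.2.length then node :: r.2 else acc.2))
        (pvIndent level ++ "- " ++ node ++ "\n", [node])

def generate_initial_prompt_alt (root : String) (hierarchy : List (String × List String)) (summaries : List (String × String)) : String :=
  let h := PySem.Dict.ofList hierarchy
  let sm := PySem.Dict.ofList summaries
  let r := pvDfs h (hierarchy.length + 1) root 0
  let longest_path :=
    if r.2.length < 3 then
      let siblings := h.getD root []
      if 2 ≤ siblings.length then
        [root, PySem.List.pyGetD siblings 0 "", PySem.List.pyGetD siblings 1 ""]
      else r.2
    else r.2
  let trace_str := PySem.Str.join " -> "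
    (longest_path.map (fun topic => "'" ++ topic ++ "' (snippet: \"" ++ pvSnippetOf (sm.getD topic "") ++ "\")"))
  pvCombinedContext ++ "\n\n" ++ "=== Concept Hierarchy ===\n" ++ r.1 ++ "\n\n" ++
    "Trace-back chain: " ++ trace_str ++ "\n\n" ++ pvTailText

-- ===== PRECONDITION & SPEC =====
-- Pre_ excludes exactly the hierarchies with a cycle reachable from the root, on which the
-- (unbounded) Python recursion raises RecursionError in both A and B. It holds iff no walk of
-- hierarchy.length + 1 steps leaves the root, i.e. the frontier reachable in that many steps is
-- empty — true precisely when the expansion from root terminates.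
-- (pvKey encodes a string as its code-point list — Char.toNat is injective, so pvKey c = pvKey k ↔
-- c = k; this numeric form keeps `decide` on Pre_ fast, which literal Char equality is not.)
def pvKey (s : String) : List Nat := s.toList.map Char.toNat

-- children of key k under Python dict semantics (the LAST entry with that key wins)
def pvChildKeys (hierarchy : List (String × List String)) (k : List Nat) : List (List Nat) :=
  ((hierarchy.reverse.find? (fun p => pvKey p.1 == k)).map (fun p => p.2.map pvKey)).getD []

-- the set of nodes reachable from the nodes of s in exactly one step
def pvNext (hierarchy : List (String × List String)) (s : List (List Nat)) : List (List Nat) :=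
  (s.flatMap (pvChildKeys hierarchy)).dedup

def Pre_generate_initial_prompt (root : String) (hierarchy : List (String × List String)) (summaries : List (String × String)) : Prop :=
  (List.range (hierarchy.length + 1)).foldl (fun s _ => pvNext hierarchy s) [pvKey root] = []

instance (root : String) (hierarchy : List (String × List String)) (summaries : List (String × String)) : Decidable (Pre_generate_initial_prompt root hierarchy summaries) := by
  unfold Pre_generate_initial_prompt; infer_instance

def pvWitness_generate_initial_prompt : String × (List (String × List String)) × (List (String × String)) :=
  ("a", [("a", ["b", "c"]), ("b", ["d"]), ("d", [])], [("a", "First sentence. More text"), ("d", "")])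

def Spec_generate_initial_prompt (root : String) (hierarchy : List (String × List String)) (summaries : List (String × String)) (out : String) : Prop := out = generate_initial_prompt_alt root hierarchy summaries
instance (root : String) (hierarchy : List (String × List String)) (summaries : List (String × String)) (out : String) : Decidable (Spec_generate_initial_prompt root hierarchy summaries out) := by unfold Spec_generate_initial_prompt; infer_instance

-- ===== CLAIM (what is proved, stated in full; the proofs are below) =====
def Claim_equal_generate_initial_prompt : Prop := ∀ (root : String) (hierarchy : List (String × List String)) (summaries : List (String × String)), Dom_generate_initial_prompt root hierarchy summaries → Pre_generate_initial_prompt root hierarchy summaries → Spec_generate_initial_prompt root hierarchy summaries (generate_initial_prompt root hierarchy summaries)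

-- ===== LEMMAS AND PROOFS =====

-- first-maximal-by-length combination (the binop inside PySem.List.max? for key = len)
def pvLonger (a b : List String) : List String :=
  if PySem.List.len a < PySem.List.len b then b else a

lemma pvLonger_assoc (a b c : List String) : pvLonger (pvLonger a b) c = pvLonger a (pvLonger b c) := by
  simp only [pvLonger, PySem.List.len_eq]
  split_ifs <;> first | rfl | omega

lemma pvFoldl_longer_assoc (l : List (List String)) (a b : List String) :
    l.foldl pvLonger (pvLonger a b) = pvLonger a (l.foldl pvLonger b) := by
  induction l generalizing b with
  | nil => rfl
  | cons x t ih => simp only [List.foldl_cons, pvLonger_assoc, ih]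

-- the foldl step of PySem.List.max? with key (fun p => PySem.List.len p)
def pvStep (acc : Option (List String)) (x : List String) : Option (List String) :=
  match acc with
  | none => some x
  | some q => if PySem.List.len q < PySem.List.len x then some x else some q

lemma pvMax?_eq_foldl (xs : List (List String)) :
    PySem.List.max? xs (fun p => PySem.List.len p) = xs.foldl pvStep none := by
  unfold PySem.List.max?
  congr 1
  funext acc x
  cases acc <;> rfl

lemma pvMaxStep_foldl (xs : List (List String)) (m : List String) :
    xs.foldl pvStep (some m) = some (xs.foldl pvLonger m) := by
  induction xs generalizing m with
  | nil => rfl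
  | cons x t ih =>
      simp only [List.foldl_cons]
      rw [show pvStep (some m) x = some (pvLonger m x) by
        simp only [pvStep, pvLonger]; split_ifs <;> rfl]
      exact ih (pvLonger m x)

lemma pvMax?_cons (x : List String) (t : List (List String)) :
    PySem.List.max? (x :: t) (fun p => PySem.List.len p) = some (t.foldl pvLonger x) := by
  rw [pvMax?_eq_foldl, List.foldl_cons]
  exact pvMaxStep_foldl t x

-- text projection of B's fold equals A's format fold
lemma pvFold_fst (h : PySem.Dict String (List String)) (f level : Nat) (node : String) :
    ∀ (cs : List String) (t0 : String) (b0 : List String),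
      (∀ c ∈ cs, (pvDfs h f c (level + 1)).1 = pvFmt h f c (level + 1)) →
      (cs.foldl
        (fun acc c =>
          let r := pvDfs h f c (level + 1)
          (acc.1 ++ r.1, if r.2.length + 1 > acc.2.length then node :: r.2 else acc.2))
        (t0, b0)).1
      = cs.foldl (fun a c => a ++ pvFmt h f c (level + 1)) t0 := by
  intro cs
  induction cs with
  | nil => intro t0 b0 _; rfl
  | cons c t ih =>
      intro t0 b0 hIH
      simp only [List.foldl_cons]
      rw [hIH c (by simp)]
      exact ih _ _ (fun c' hc' => hIH c' (by simp [hc']))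

-- best-path projection of B's fold
lemma pvFold_snd (h : PySem.Dict String (List String)) (f level : Nat) (node : String) :
    ∀ (cs : List String) (t0 : String) (b0 : List String),
      (cs.foldl
        (fun acc c =>
          let r := pvDfs h f c (level + 1)
          (acc.1 ++ r.1, if r.2.length + 1 > acc.2.length then node :: r.2 else acc.2))
        (t0, b0)).2
      = cs.foldl
          (fun b c =>
            if (pvDfs h f c (level + 1)).2.length + 1 > b.length then node :: (pvDfs h f c (level + 1)).2 else b)
          b0 := by
  intro cs
  induction cs with
  | nil => intro t0 b0; rfl
  | cons c t ih => intro t0 b0; simp only [List.foldl_cons]; exact ih _ _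

-- A's running max over the concatenated child path lists equals B's best-path fold
lemma pvBest_fold (h : PySem.Dict String (List String)) (f level : Nat) (node : String) (path : List String) :
    ∀ (cs : List String) (bt : List String),
      (∀ c ∈ cs,
        PySem.List.max? (pvTrav h f c (path ++ [node])) (fun p => PySem.List.len p)
          = some ((path ++ [node]) ++ (pvDfs h f c (level + 1)).2)) →
      cs.foldl (fun a c => (pvTrav h f c (path ++ [node])).foldl pvStep a)
        (some (path ++ (node :: bt)))
      = some (path ++ cs.foldl
          (fun b c =>
            if (pvDfs h f c (level + 1)).2.length + 1 > b.length then node :: (pvDfs h f c (level + 1)).2 else b)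
          (node :: bt)) := by
  intro cs
  induction cs with
  | nil => intro bt _; rfl
  | cons c t ih =>
      intro bt hIH
      have hmax := hIH c (by simp)
      simp only [List.foldl_cons]
      have hne : pvTrav h f c (path ++ [node]) ≠ [] := by
        intro hnil
        rw [hnil] at hmax
        exact absurd hmax (by simp [PySem.List.max?])
      obtain ⟨q, qs, hq⟩ := List.exists_cons_of_ne_nil hne
      have hqmax : qs.foldl pvLonger q = (path ++ [node]) ++ (pvDfs h f c (level + 1)).2 := by
        have := hmax
        rw [hq, pvMax?_cons] at this
        exact Option.some_injective _ this
      have hstep :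
          (pvTrav h f c (path ++ [node])).foldl pvStep (some (path ++ (node :: bt)))
          = some (pvLonger (path ++ (node :: bt)) ((path ++ [node]) ++ (pvDfs h f c (level + 1)).2)) := by
        rw [hq, List.foldl_cons,
          show pvStep (some (path ++ (node :: bt))) q = some (pvLonger (path ++ (node :: bt)) q) by
            simp only [pvStep, pvLonger]; split_ifs <;> rfl,
          pvMaxStep_foldl, pvFoldl_longer_assoc, hqmax]
      rw [hstep]
      have harith :
          pvLonger (path ++ (node :: bt)) ((path ++ [node]) ++ (pvDfs h f c (level + 1)).2)
          = path ++ (if (pvDfs h f c (level + 1)).2.length + 1 > (node :: bt).length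
                      then node :: (pvDfs h f c (level + 1)).2 else (node :: bt)) := by
        simp only [pvLonger, PySem.List.len_eq, List.length_append, List.length_cons,
          List.append_assoc, List.singleton_append]
        split_ifs with h1 h2 h2
        · rfl
        · omega
        · omega
        · rfl
      rw [harith]
      split_ifs with hcond
      · exact ih (pvDfs h f c (level + 1)).2 (fun c' hc' => hIH c' (by simp [hc']))
      · exact ih bt (fun c' hc' => hIH c' (by simp [hc']))

-- the best-path fold always keeps a node-headed list
lemma pvFold_best_head (node : String) (g : String → List String) :
    ∀ (cs : List String) (bt : List String),
      ∃ t, cs.foldl (fun b c => if (g c).length + 1 > b.length then node :: g c else b) (node :: bt)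
             = node :: t := by
  intro cs
  induction cs with
  | nil => intro bt; exact ⟨bt, rfl⟩
  | cons c t ih =>
      intro bt
      simp only [List.foldl_cons]
      split_ifs
      · exact ih (g c)
      · exact ih bt

-- main invariant: one DFS computes A's formatted text and the first-maximal root-to-leaf path
lemma pvDfs_spec (h : PySem.Dict String (List String)) :
    ∀ (f : Nat) (node : String) (level : Nat) (path : List String),
      (pvDfs h f node level).1 = pvFmt h f node level ∧
      (∃ t, (pvDfs h f node level).2 = node :: t) ∧
      PySem.List.max? (pvTrav h f node path) (fun p => PySem.List.len p)
        = some (path ++ (pvDfs h f node level).2) := by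
  intro f
  induction f with
  | zero =>
      intro node level path
      refine ⟨rfl, ⟨[], rfl⟩, ?_⟩
      have htrav : pvTrav h 0 node path = [path ++ [node]] := by
        rw [pvTrav]
        cases hg : h.get? node with
        | none => rfl
        | some cs => by_cases hcs : cs = [] <;> simp [hcs]
      rw [htrav, pvMax?_cons]
      rfl
  | succ f ihf =>
      intro node level path
      cases hg : h.get? node with
      | none =>
          have hgd : h.getD node [] = [] := PySem.Dict.getD_of_get?_eq_none h [] hg
          have htrav : pvTrav h (f + 1) node path = [path ++ [node]] := by
            rw [pvTrav]; simp [hg]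
          refine ⟨?_, ⟨[], ?_⟩, ?_⟩
          · rw [pvDfs, pvFmt, hgd]; rfl
          · rw [pvDfs, hgd]; rfl
          · rw [htrav, pvMax?_cons, pvDfs, hgd]; rfl
      | some cs =>
          have hgd : h.getD node [] = cs := by
            rw [PySem.Dict.getD_eq_get?_getD, hg]; rfl
          cases cs with
          | nil =>
              have htrav : pvTrav h (f + 1) node path = [path ++ [node]] := by
                rw [pvTrav]; simp [hg]
              refine ⟨?_, ⟨[], ?_⟩, ?_⟩
              · rw [pvDfs, pvFmt, hgd]; rfl
              · rw [pvDfs, hgd]; rfl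
              · rw [htrav, pvMax?_cons, pvDfs, hgd]; rfl
          | cons c cs' =>
              obtain ⟨hc1, ⟨tc, hc2⟩, hc3⟩ := ihf c (level + 1) (path ++ [node])
              have hdfs2 : (pvDfs h (f + 1) node level).2
                  = cs'.foldl
                      (fun b c' =>
                        if (pvDfs h f c' (level + 1)).2.length + 1 > b.length
                        then node :: (pvDfs h f c' (level + 1)).2 else b)
                      (node :: (pvDfs h f c (level + 1)).2) := by
                rw [pvDfs, hgd, pvFold_snd, List.foldl_cons]
                congr 1
                rw [hc2]
                simp
              refine ⟨?_, ?_, ?_⟩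
              · rw [pvDfs, pvFmt, hgd]
                exact pvFold_fst h f level node (c :: cs') _ _
                  (fun c' _ => (ihf c' (level + 1) []).1)
              · rw [hdfs2]
                obtain ⟨tb, htb⟩ := pvFold_best_head node (fun c' => (pvDfs h f c' (level + 1)).2)
                  cs' (pvDfs h f c (level + 1)).2
                exact ⟨tb, htb⟩
              · have htrav : pvTrav h (f + 1) node path
                    = (c :: cs').foldl (fun acc c' => acc ++ pvTrav h f c' (path ++ [node])) [] := by
                  rw [pvTrav]; simp [hg]
                rw [htrav, PySem.List.foldl_append_eq_flatMap, List.nil_append,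
                  pvMax?_eq_foldl, List.foldl_flatMap, List.foldl_cons]
                have hfirst : (pvTrav h f c (path ++ [node])).foldl pvStep none
                    = some (path ++ (node :: (pvDfs h f c (level + 1)).2)) := by
                  rw [← pvMax?_eq_foldl, hc3]
                  simp
                rw [hfirst, pvBest_fold h f level node path cs' (pvDfs h f c (level + 1)).2
                  (fun c' _ => (ihf c' (level + 1) (path ++ [node])).2.2)]
                rw [hdfs2]

-- the snippet dict A builds agrees pointwise with B's on-demand snippet
lemma pvSnippet_dict (summaries : List (String × String)) (t : String) :
    ((PySem.Dict.ofList summaries).items.foldl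
        (fun d p => d.insert p.1 (pvSnippetOf p.2)) PySem.Dict.empty).getD t ""
      = pvSnippetOf ((PySem.Dict.ofList summaries).getD t "") := by
  have hnd : (PySem.Dict.ofList summaries).keys.Nodup := PySem.Dict.nodup_keys_ofList summaries
  have hitems : ((PySem.Dict.ofList summaries).items.foldl
        (fun d p => d.insert p.1 (pvSnippetOf p.2)) PySem.Dict.empty).items
      = PySem.Dict.empty.items
          ++ (PySem.Dict.ofList summaries).items.map (fun p => (p.1, pvSnippetOf p.2)) := by
    exact PySem.Dict.items_foldl_insert_fresh (PySem.Dict.ofList summaries).items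
      (fun p => p.1) (fun p => pvSnippetOf p.2) PySem.Dict.empty
      (fun a _ => PySem.Dict.contains_empty _) hnd
  have hkeys : ((PySem.Dict.ofList summaries).items.foldl
        (fun d p => d.insert p.1 (pvSnippetOf p.2)) PySem.Dict.empty).keys
      = (PySem.Dict.ofList summaries).keys := by
    simp only [PySem.Dict.keys, hitems]
    simp [List.map_map, Function.comp_def, show PySem.Dict.empty.items = ([] : List (String × String)) from rfl]
  cases hg : (PySem.Dict.ofList summaries).get? t with
  | none =>
      have ht : t ∉ (PySem.Dict.ofList summaries).keys :=
        (PySem.Dict.get?_eq_none_iff_not_mem_keys _ _).mp hg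
      have hgn : ((PySem.Dict.ofList summaries).items.foldl
          (fun d p => d.insert p.1 (pvSnippetOf p.2)) PySem.Dict.empty).get? t = none := by
        rw [PySem.Dict.get?_eq_none_iff_not_mem_keys, hkeys]; exact ht
      rw [PySem.Dict.getD_of_get?_eq_none _ _ hgn,
        PySem.Dict.getD_of_get?_eq_none _ _ hg]
      rfl
  | some v =>
      have hmem : (t, v) ∈ (PySem.Dict.ofList summaries).items :=
        PySem.Dict.mem_items_of_get?_eq_some _ hg
      have hmem2 : (t, pvSnippetOf v) ∈ ((PySem.Dict.ofList summaries).items.foldl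
          (fun d p => d.insert p.1 (pvSnippetOf p.2)) PySem.Dict.empty).items := by
        rw [hitems]
        refine List.mem_append_right _ ?_
        exact List.mem_map.mpr ⟨(t, v), hmem, rfl⟩
      rw [PySem.Dict.getD_of_mem_items _ hmem2 (by rw [hkeys]; exact hnd)]
      have : (PySem.Dict.ofList summaries).getD t "" = v := by
        rw [PySem.Dict.getD_eq_get?_getD, hg]; rfl
      rw [this]

-- A's sibling guard 'siblings and len(siblings) >= 2' is the same test as B's 'len(siblings) >= 2'
lemma pvSib_if (sib : List String) (x y : List String) :
    (if sib ≠ [] ∧ 2 ≤ sib.length then x else y) = (if 2 ≤ sib.length then x else y) := by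
  by_cases h2 : 2 ≤ sib.length
  · have hne : sib ≠ [] := by
      intro e; rw [e] at h2; simp at h2
    simp [h2, hne]
  · simp [h2]

-- ===== VERDICT (by name: the statement is the Claim_ definition above) =====
theorem generate_initial_prompt_spec : Claim_equal_generate_initial_prompt := by
  intro root hierarchy summaries _ _
  unfold Spec_generate_initial_prompt
  obtain ⟨h1, ⟨tb, h2⟩, h3⟩ :=
    pvDfs_spec (PySem.Dict.ofList hierarchy) (hierarchy.length + 1) root 0 []
  rw [List.nil_append] at h3
  have hfun : (fun topic => "'" ++ topic ++ "' (snippet: \"" ++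
        ((PySem.Dict.ofList summaries).items.foldl
          (fun d p => d.insert p.1 (pvSnippetOf p.2)) PySem.Dict.empty).getD topic "" ++ "\")")
      = (fun topic => "'" ++ topic ++ "' (snippet: \"" ++
        pvSnippetOf ((PySem.Dict.ofList summaries).getD topic "") ++ "\")") := by
    funext t
    rw [pvSnippet_dict]
  simp only [generate_initial_prompt, generate_initial_prompt_alt, h3, h1, hfun,
    pvSib_if]
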